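-- pv_equiv track=rewrite | github.com/Skamba/VibeSensor | apps/server/vibesensor/report/report_data.py | _has_relevant_reference_gap
-- ===== SOURCE A (Python) =====
-- def _has_relevant_reference_gap(findings: list[dict], primary_source: object) -> bool:
--     src = str(primary_source or "").strip().lower()
--     for finding in findings:
--         fid = str(finding.get("finding_id") or "").strip().upper()
--         if fid in {"REF_SPEED", "REF_SAMPLE_RATE"}:
--             return True
--         if fid == "REF_WHEEL" and src in {"wheel/tire", "driveline"}:
--             return True
--         if fid == "REF_ENGINE" and src == "engine":
--             return True
--     return False
-- ===== SOURCE B (Python) =====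
-- def _has_relevant_reference_gap(findings: list[dict], primary_source: object) -> bool:
--     # Stage 1: a branch-free pass collects every normalized finding id.
--     fids = {str(f.get("finding_id") or "").strip().upper() for f in findings}
--     # Stage 2: test the three relevance conditions against the collected set.
--     if not fids.isdisjoint({"REF_SPEED", "REF_SAMPLE_RATE"}):
--         return True
--     src = str(primary_source or "").strip().lower()
--     if "REF_WHEEL" in fids and src in ("wheel/tire", "driveline"):
--         return True
--     return "REF_ENGINE" in fids and src == "engine"
-- ===== Notes on version B (the rewrite author's own statement) =====
-- stated objective: alternative
-- what changed: Inverts the decomposition: instead of A's per-finding if-chain with early return, B first collects the set of all normalized finding ids in one branch-free pass, then tests the three relevance conditions once against that collected set; correct because an early-return any-match over a boolean condition equals a disjunction over the collected elements.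
import Mathlib
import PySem

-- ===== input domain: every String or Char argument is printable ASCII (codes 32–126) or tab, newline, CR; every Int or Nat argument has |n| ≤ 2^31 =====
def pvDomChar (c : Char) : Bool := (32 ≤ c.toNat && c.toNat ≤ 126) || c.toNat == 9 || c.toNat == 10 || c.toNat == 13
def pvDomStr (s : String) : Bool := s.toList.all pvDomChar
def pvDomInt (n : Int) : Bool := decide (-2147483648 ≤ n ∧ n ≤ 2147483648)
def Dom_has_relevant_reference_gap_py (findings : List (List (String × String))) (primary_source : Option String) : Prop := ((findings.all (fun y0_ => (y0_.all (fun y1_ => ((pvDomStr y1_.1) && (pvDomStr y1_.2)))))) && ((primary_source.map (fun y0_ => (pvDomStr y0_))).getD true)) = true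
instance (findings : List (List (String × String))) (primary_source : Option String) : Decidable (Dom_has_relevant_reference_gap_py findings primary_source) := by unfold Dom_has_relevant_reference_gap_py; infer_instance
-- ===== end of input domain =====

-- B inverts the decomposition: one branch-free pass collects the set of all
-- normalized finding ids, then the three relevance conditions are tested once
-- against that collected set (alternative decomposition, same cost).

-- ===== PORT A =====
-- A's for-loop with early returns, as structural recursion; the per-finding
-- if-chain stays inside the loop exactly as in A.
def hrrgLoopA (src : String) : List (List (String × String)) → Bool
  | [] => false
  | finding :: rest =>
    let fid := PySem.Str.upper (PySem.Str.strip (((PySem.Dict.mk finding).get? "finding_id").getD ""))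
    if fid = "REF_SPEED" ∨ fid = "REF_SAMPLE_RATE" then true
    else if fid = "REF_WHEEL" ∧ (src = "wheel/tire" ∨ src = "driveline") then true
    else if fid = "REF_ENGINE" ∧ src = "engine" then true
    else hrrgLoopA src rest

def has_relevant_reference_gap_py (findings : List (List (String × String))) (primary_source : Option String) : Bool :=
  let src := PySem.Str.lower (PySem.Str.strip (primary_source.getD ""))
  hrrgLoopA src findings

-- ===== PORT B =====
-- normalization of one finding's id (the set comprehension's element)
def hrrgNorm (finding : List (String × String)) : String :=
  PySem.Str.upper (PySem.Str.strip (((PySem.Dict.mk finding).get? "finding_id").getD ""))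

def has_relevant_reference_gap_py_alt (findings : List (List (String × String))) (primary_source : Option String) : Bool :=
  -- Stage 1: collect the set of all normalized finding ids
  let fids : PySem.Set String := PySem.Set.ofList (findings.map hrrgNorm)
  -- Stage 2: test the three relevance conditions against the collected set
  if ¬ (PySem.Set.isdisjoint fids (PySem.Set.ofList ["REF_SPEED", "REF_SAMPLE_RATE"]) = true) then true
  else
    let src := PySem.Str.lower (PySem.Str.strip (primary_source.getD ""))
    if PySem.Set.contains fids "REF_WHEEL" ∧ (src = "wheel/tire" ∨ src = "driveline") then true
    else PySem.Set.contains fids "REF_ENGINE" && (src == "engine")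

-- ===== PRECONDITION & SPEC =====
def Spec_has_relevant_reference_gap_py (findings : List (List (String × String))) (primary_source : Option String) (out : Bool) : Prop := out = has_relevant_reference_gap_py_alt findings primary_source
instance (findings : List (List (String × String))) (primary_source : Option String) (out : Bool) : Decidable (Spec_has_relevant_reference_gap_py findings primary_source out) := by unfold Spec_has_relevant_reference_gap_py; infer_instance

-- ===== CLAIM (what is proved, stated in full; the proofs are below) =====
def Claim_equal_has_relevant_reference_gap_py : Prop := ∀ (findings : List (List (String × String))) (primary_source : Option String), Dom_has_relevant_reference_gap_py findings primary_source → Spec_has_relevant_reference_gap_py findings primary_source (has_relevant_reference_gap_py findings primary_source)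

-- ===== LEMMAS AND PROOFS =====
-- A's early-return loop holds iff some finding satisfies its if-chain
theorem hrrg_loop_iff (src : String) (fs : List (List (String × String))) :
    hrrgLoopA src fs = true
      ↔ ∃ f ∈ fs, (hrrgNorm f = "REF_SPEED" ∨ hrrgNorm f = "REF_SAMPLE_RATE")
          ∨ (hrrgNorm f = "REF_WHEEL" ∧ (src = "wheel/tire" ∨ src = "driveline"))
          ∨ (hrrgNorm f = "REF_ENGINE" ∧ src = "engine") := by
  induction fs with
  | nil => simp [hrrgLoopA]
  | cons f rest ih =>
    simp only [hrrgLoopA, hrrgNorm]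
    split_ifs with h1 h2 h3
    · simp only [List.mem_cons, true_iff]
      exact ⟨f, Or.inl rfl, Or.inl h1⟩
    · simp only [List.mem_cons, true_iff]
      exact ⟨f, Or.inl rfl, Or.inr (Or.inl h2)⟩
    · simp only [List.mem_cons, true_iff]
      exact ⟨f, Or.inl rfl, Or.inr (Or.inr h3)⟩
    · rw [ih]
      constructor
      · rintro ⟨g, hg, hp⟩; exact ⟨g, List.mem_cons_of_mem _ hg, hp⟩
      · rintro ⟨g, hg, hp⟩
        rcases List.mem_cons.mp hg with rfl | hg'
        · rcases hp with hp | hp | hp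
          exacts [absurd hp h1, absurd hp h2, absurd hp h3]
        · exact ⟨g, hg', hp⟩

-- B's set membership is existence in the collecting pass
theorem hrrg_contains_iff (fs : List (List (String × String))) (x : String) :
    PySem.Set.contains (PySem.Set.ofList (fs.map hrrgNorm)) x = true
      ↔ ∃ f ∈ fs, hrrgNorm f = x := by
  rw [PySem.Set.contains_iff, PySem.Set.mem_ofList, List.mem_map]

-- B's disjointness test is absence of the two unconditional ids
theorem hrrg_disjoint_iff (fs : List (List (String × String))) :
    PySem.Set.isdisjoint (PySem.Set.ofList (fs.map hrrgNorm))
        (PySem.Set.ofList ["REF_SPEED", "REF_SAMPLE_RATE"]) = true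
      ↔ ¬ ∃ f ∈ fs, hrrgNorm f = "REF_SPEED" ∨ hrrgNorm f = "REF_SAMPLE_RATE" := by
  rw [PySem.Set.isdisjoint_iff]
  constructor
  · rintro h ⟨f, hf, hp⟩
    exact h _ ((PySem.Set.mem_ofList _ _).mpr (List.mem_map_of_mem hf))
      ((PySem.Set.mem_ofList _ _).mpr (by rcases hp with hp | hp <;> simp [hp]))
  · intro h x hx hmem
    obtain ⟨f, hf, rfl⟩ := List.mem_map.mp ((PySem.Set.mem_ofList _ _).mp hx)
    refine h ⟨f, hf, ?_⟩
    have hm := (PySem.Set.mem_ofList _ _).mp hmem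
    simpa using hm

-- ===== VERDICT (by name: the statement is the Claim_ definition above) =====
theorem has_relevant_reference_gap_py_spec : Claim_equal_has_relevant_reference_gap_py := by
  intro findings primary_source _
  unfold Spec_has_relevant_reference_gap_py
  simp only [has_relevant_reference_gap_py, has_relevant_reference_gap_py_alt]
  rw [Bool.eq_iff_iff, hrrg_loop_iff]
  by_cases hs : ∃ f ∈ findings, hrrgNorm f = "REF_SPEED" ∨ hrrgNorm f = "REF_SAMPLE_RATE"
  · rw [if_pos (show ¬ _ from fun h => (hrrg_disjoint_iff findings).mp h hs)]
    simp only [iff_true]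
    obtain ⟨f, hf, hp⟩ := hs
    exact ⟨f, hf, Or.inl hp⟩
  · rw [if_neg (fun h => h ((hrrg_disjoint_iff findings).mpr hs))]
    split_ifs with h2
    · simp only [iff_true]
      obtain ⟨f, hf, hw⟩ := (hrrg_contains_iff findings "REF_WHEEL").mp h2.1
      exact ⟨f, hf, Or.inr (Or.inl ⟨hw, h2.2⟩)⟩
    · rw [Bool.and_eq_true, beq_iff_eq, hrrg_contains_iff]
      constructor
      · rintro ⟨f, hf, hp | hp | hp⟩
        · exact absurd ⟨f, hf, hp⟩ hs
        · exact absurd ⟨(hrrg_contains_iff findings "REF_WHEEL").mpr ⟨f, hf, hp.1⟩, hp.2⟩ h2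
        · exact ⟨⟨f, hf, hp.1⟩, hp.2⟩
      · rintro ⟨⟨f, hf, hp⟩, he⟩
        exact ⟨f, hf, Or.inr (Or.inr ⟨hp, he⟩)⟩
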